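-- pv_equiv track=rewrite | github.com/Infrapink/calconv | solun.py | julian_nyd
-- ===== SOURCE A (Python) =====
-- julian_epoch = 1721424 - 366 # 1st January of the year 0
--
-- solar4 = (4 * 365) + 1 # 3 years of 365 days and one leap year of 366 days
--
-- def julian_year_length(year):
--     '''Returns the number of days in a year in the Julian calendar, assuming there is a year 0'''
--
--     if (int(year) % 4 == 0):
--         ans = 366
--     else:
--         ans = 365
--
--     return ans
--
-- def julian_nyd(year, z):
--     '''Returns the Julian Day corresponding to 1st January in a given year in the Julian calendar'''
--     year = int(year) # the year in question
--     z = bool(z) # is there a year 0?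
--
--     if (year < 0):
--         year += int(not(z))
--
--     cycles = year // 4
--     y = 4 * cycles
--     ans = julian_epoch + (cycles * solar4)
--     while (y < year):
--         ans += julian_year_length(y)
--         y += 1
--
--     return ans
-- ===== SOURCE B (Python) =====
-- julian_epoch = 1721424 - 366
--
-- solar4 = (4 * 365) + 1
--
-- def julian_nyd(year, z):
--     '''Returns the Julian Day corresponding to 1st January in a given year in the Julian calendar'''
--     year = int(year)
--     z = bool(z)
--     if year < 0:
--         year += int(not z)
--     r = year % 4
--     return julian_epoch + (year // 4) * solar4 + 365 * r + (1 if r else 0)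
-- ===== Notes on version B (the rewrite author's own statement) =====
-- stated objective: simpler
-- what changed: Replaces the while loop over the residual years (and the julian_year_length helper) with a closed-form expression in year % 4.
import Mathlib
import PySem

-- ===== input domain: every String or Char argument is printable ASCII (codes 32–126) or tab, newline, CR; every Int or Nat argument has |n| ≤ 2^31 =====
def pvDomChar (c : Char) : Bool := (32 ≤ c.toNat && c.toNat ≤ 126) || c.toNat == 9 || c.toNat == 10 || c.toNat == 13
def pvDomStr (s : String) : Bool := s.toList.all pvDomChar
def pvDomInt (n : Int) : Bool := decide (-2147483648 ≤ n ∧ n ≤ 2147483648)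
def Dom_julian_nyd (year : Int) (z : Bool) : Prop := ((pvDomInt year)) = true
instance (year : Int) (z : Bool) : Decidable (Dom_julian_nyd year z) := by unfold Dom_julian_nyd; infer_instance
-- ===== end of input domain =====

-- B replaces A's residual while loop (and julian_year_length) by a closed form in year % 4; objective: simpler.

-- ===== PORT A =====
def julianEpoch : Int := 1721424 - 366

def solar4 : Int := (4 * 365) + 1

def julian_year_length (year : Int) : Int :=
  if PySem.Int.mod year 4 == 0 then 366 else 365

-- the while (y < year) loop of A, recursing on the remaining distance
def julianLoop (ans y year : Int) : Int :=
  if y < year then julianLoop (ans + julian_year_length y) (y + 1) year else ans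
termination_by (year - y).toNat
decreasing_by omega

def julian_nyd (year : Int) (z : Bool) : Int :=
  let year := if year < 0 then year + (if z then 0 else 1) else year
  let cycles := PySem.Int.floordiv year 4
  let y := 4 * cycles
  let ans := julianEpoch + cycles * solar4
  julianLoop ans y year

-- ===== PORT B =====
def julian_nyd_alt (year : Int) (z : Bool) : Int :=
  let year := if year < 0 then year + (if z then 0 else 1) else year
  let r := PySem.Int.mod year 4
  julianEpoch + (PySem.Int.floordiv year 4) * solar4 + 365 * r + (if r ≠ 0 then 1 else 0)

-- ===== PRECONDITION & SPEC =====
def Spec_julian_nyd (year : Int) (z : Bool) (out : Int) : Prop := out = julian_nyd_alt year z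
instance (year : Int) (z : Bool) (out : Int) : Decidable (Spec_julian_nyd year z out) := by unfold Spec_julian_nyd; infer_instance

-- ===== CLAIM (what is proved, stated in full; the proofs are below) =====
def Claim_equal_julian_nyd : Prop := ∀ (year : Int) (z : Bool), Dom_julian_nyd year z → Spec_julian_nyd year z (julian_nyd year z)

-- ===== LEMMAS AND PROOFS =====

theorem julianLoop_stop (ans y year : Int) (h : ¬ y < year) : julianLoop ans y year = ans := by
  rw [julianLoop]; simp [h]

theorem julianLoop_step (ans y year : Int) (h : y < year) :
    julianLoop ans y year = julianLoop (ans + julian_year_length y) (y + 1) year := by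
  rw [julianLoop]; simp [h]

theorem jyl_mul (c : Int) : julian_year_length (4 * c) = 366 := by
  simp [julian_year_length]

theorem jyl_not_mul (y : Int) (h : ¬ (4 ∣ y)) : julian_year_length y = 365 := by
  have hm : PySem.Int.mod y 4 = y % 4 := PySem.Int.mod_eq_emod_of_pos (by norm_num)
  simp [julian_year_length, hm]
  omega

theorem julianLoop_closed (ans year : Int) :
    julianLoop ans (4 * PySem.Int.floordiv year 4) year =
      ans + 365 * PySem.Int.mod year 4 + (if PySem.Int.mod year 4 ≠ 0 then 1 else 0) := by
  have hf : PySem.Int.floordiv year 4 = year / 4 :=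
    PySem.Int.floordiv_eq_ediv_of_pos (by norm_num)
  have hm : PySem.Int.mod year 4 = year % 4 :=
    PySem.Int.mod_eq_emod_of_pos (by norm_num)
  rw [hf, hm]
  have h4 : 4 * (year / 4) = year - year % 4 := by omega
  have hr : year % 4 = 0 ∨ year % 4 = 1 ∨ year % 4 = 2 ∨ year % 4 = 3 := by omega
  rcases hr with h | h | h | h
  · rw [julianLoop_stop _ _ _ (by omega)]; simp [h]
  · rw [julianLoop_step _ _ _ (by omega)]
    rw [show (4 * (year / 4) : Int) + 1 = year from by omega]
    rw [julianLoop_stop _ _ _ (by omega)]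
    rw [jyl_mul]
    simp [h]; ring
  · rw [julianLoop_step _ _ _ (by omega)]
    rw [julianLoop_step _ _ _ (by omega)]
    rw [show (4 * (year / 4) : Int) + 1 + 1 = year from by omega]
    rw [julianLoop_stop _ _ _ (by omega)]
    rw [jyl_mul, jyl_not_mul _ (by omega)]
    simp [h]; ring
  · rw [julianLoop_step _ _ _ (by omega)]
    rw [julianLoop_step _ _ _ (by omega)]
    rw [julianLoop_step _ _ _ (by omega)]
    rw [show (4 * (year / 4) : Int) + 1 + 1 + 1 = year from by omega]
    rw [julianLoop_stop _ _ _ (by omega)]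
    rw [jyl_mul, jyl_not_mul _ (by omega), jyl_not_mul _ (by omega)]
    simp [h]; ring

-- ===== VERDICT (by name: the statement is the Claim_ definition above) =====
theorem julian_nyd_spec : Claim_equal_julian_nyd := by
  intro year z _
  unfold Spec_julian_nyd julian_nyd julian_nyd_alt
  exact julianLoop_closed _ _
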